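-- pv_equiv track=rewrite | github.com/HiramAle/AsesoriasPython | Ejercicios PreExamen.py | diagonal_validation
-- ===== SOURCE A (Python) =====
-- def diagonal_validation(matrix: list, diagonal_sum):
--     suma = 0
--     for i in range(len(matrix)):
--         if matrix[i][i] == 1 and matrix[i][len(matrix) - 1 - i] == 1:
--             suma += matrix[i][i]
--             suma += matrix[i][len(matrix) - 1 - i]
--         else:
--             return False
--
--     if len(matrix) % 2 > 0:
--         suma -= matrix[len(matrix) // 2][len(matrix) // 2]
--
--     if suma == diagonal_sum:
--         return True
--     else:
--         return False
-- ===== SOURCE B (Python) =====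
-- def diagonal_validation(matrix: list, diagonal_sum):
--     n = len(matrix)
--     ok = all(matrix[i][i] == 1 and matrix[i][n - 1 - i] == 1 for i in range(n))
--     return ok and diagonal_sum == 2 * n - (n % 2)
-- ===== Notes on version B (the rewrite author's own statement) =====
-- stated objective: simpler
-- what changed: Split validation from summation: a short-circuiting all(...) checks both diagonals are 1, and the running accumulator is replaced by the closed-form sum 2*n - (n % 2) compared directly with diagonal_sum.
import Mathlib
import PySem

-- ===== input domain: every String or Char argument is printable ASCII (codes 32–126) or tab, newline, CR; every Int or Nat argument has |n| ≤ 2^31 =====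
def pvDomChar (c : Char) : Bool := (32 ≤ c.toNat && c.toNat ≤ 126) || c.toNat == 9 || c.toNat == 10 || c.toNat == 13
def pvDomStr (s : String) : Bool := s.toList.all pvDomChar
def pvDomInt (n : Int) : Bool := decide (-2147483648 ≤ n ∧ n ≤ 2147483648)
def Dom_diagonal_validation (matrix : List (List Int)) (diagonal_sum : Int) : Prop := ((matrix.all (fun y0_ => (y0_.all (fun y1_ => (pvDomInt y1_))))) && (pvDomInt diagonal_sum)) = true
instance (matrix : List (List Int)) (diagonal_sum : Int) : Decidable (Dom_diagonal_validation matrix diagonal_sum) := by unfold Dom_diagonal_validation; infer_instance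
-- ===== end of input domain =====

-- B replaces A's running accumulator with a closed-form sum 2*n - n%2 and a separate
-- short-circuiting all-check of the two diagonals (objective: simpler).

-- ===== PORT A =====
-- Exact transliteration of A; the loop's early `return False` is the `none` state of the
-- fold (pvStep is the loop body).  Where Python raises IndexError, pyGet? yields `none`
-- (those inputs are excluded by Pre_diagonal_validation).
def pvStep (matrix : List (List Int)) (n : Int) : Option Int → Int → Option Int :=
  fun st i => match st with
    | none => none
    | some suma =>
      let a := (PySem.List.pyGet? matrix i).bind (fun r => PySem.List.pyGet? r i)
      let b := (PySem.List.pyGet? matrix i).bind (fun r => PySem.List.pyGet? r (n - 1 - i))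
      if a = some 1 ∧ b = some 1 then some (suma + a.getD 0 + b.getD 0) else none

def diagonal_validation (matrix : List (List Int)) (diagonal_sum : Int) : Bool :=
  let n : Int := (matrix.length : Int)
  match (PySem.List.pyRange 0 n 1).foldl (pvStep matrix n) (some 0) with
  | none => false
  | some suma =>
    let suma' := if n % 2 > 0 then
        suma - ((PySem.List.pyGet? matrix (PySem.Int.floordiv n 2)).bind
                 (fun r => PySem.List.pyGet? r (PySem.Int.floordiv n 2))).getD 0
      else suma
    decide (suma' = diagonal_sum)

-- ===== PORT B =====
-- pvChk is the body of B's short-circuiting generator (both diagonal entries of row i are 1).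
def pvChk (matrix : List (List Int)) (n : Int) : Int → Bool :=
  fun i =>
    (((PySem.List.pyGet? matrix i).bind (fun r => PySem.List.pyGet? r i)) == some 1) &&
    (((PySem.List.pyGet? matrix i).bind (fun r => PySem.List.pyGet? r (n - 1 - i))) == some 1)

def diagonal_validation_alt (matrix : List (List Int)) (diagonal_sum : Int) : Bool :=
  let n : Int := (matrix.length : Int)
  let ok := (PySem.List.pyRange 0 n 1).all (pvChk matrix n)
  ok && (diagonal_sum == 2 * n - n % 2)

-- ===== PRECONDITION & SPEC =====
-- Pre_ excludes exactly the inputs on which A raises IndexError: some row reached by the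
-- loop (all earlier rows validated) is too short for the index A actually reads
-- (the second access happens only after matrix[i][i] == 1, mirroring `and` short-circuit).
def Pre_diagonal_validation (matrix : List (List Int)) (diagonal_sum : Int) : Prop :=
  ∀ i < matrix.length,
    (∀ j < i, (matrix.getD j [])[j]? = some (1 : Int) ∧
              (matrix.getD j [])[matrix.length - 1 - j]? = some (1 : Int)) →
    (i < (matrix.getD i []).length ∧
      ((matrix.getD i [])[i]? = some (1 : Int) →
        matrix.length - 1 - i < (matrix.getD i []).length))
instance (matrix : List (List Int)) (diagonal_sum : Int) : Decidable (Pre_diagonal_validation matrix diagonal_sum) := by unfold Pre_diagonal_validation; infer_instance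

def pvWitness_diagonal_validation : List (List Int) × Int := ([[1, 1], [1, 1]], 4)

def Spec_diagonal_validation (matrix : List (List Int)) (diagonal_sum : Int) (out : Bool) : Prop := out = diagonal_validation_alt matrix diagonal_sum
instance (matrix : List (List Int)) (diagonal_sum : Int) (out : Bool) : Decidable (Spec_diagonal_validation matrix diagonal_sum out) := by unfold Spec_diagonal_validation; infer_instance

-- ===== CLAIM (what is proved, stated in full; the proofs are below) =====
def Claim_equal_diagonal_validation : Prop := ∀ (matrix : List (List Int)) (diagonal_sum : Int), Dom_diagonal_validation matrix diagonal_sum → Pre_diagonal_validation matrix diagonal_sum → Spec_diagonal_validation matrix diagonal_sum (diagonal_validation matrix diagonal_sum)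

-- ===== LEMMAS AND PROOFS =====

theorem pvBeq_decide (x y : Int) : (y == x) = (decide (x = y)) := by
  by_cases h : x = y
  · subst h; simp
  · simp [h, Ne.symm h]

theorem foldl_pvStep_none (matrix : List (List Int)) (n : Int) (L : List Int) :
    L.foldl (pvStep matrix n) none = none := by
  induction L with
  | nil => rfl
  | cons h t ih => simpa [List.foldl, pvStep] using ih

theorem foldl_pvStep_char (matrix : List (List Int)) (n : Int) (L : List Int) (s : Int) :
    L.foldl (pvStep matrix n) (some s)
      = if L.all (pvChk matrix n) then some (s + 2 * L.length) else none := by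
  induction L generalizing s with
  | nil => simp
  | cons h t ih =>
    by_cases hh : pvChk matrix n h = true
    · have ⟨ha, hb⟩ : ((PySem.List.pyGet? matrix h).bind (fun r => PySem.List.pyGet? r h)) = some 1 ∧
          ((PySem.List.pyGet? matrix h).bind (fun r => PySem.List.pyGet? r (n - 1 - h))) = some 1 := by
        simpa [pvChk, Bool.and_eq_true] using hh
      have hstep : pvStep matrix n (some s) h = some (s + 2) := by
        simp only [pvStep, ha, hb, Option.getD_some, and_self, if_true]
        congr 1; ring
      rw [List.foldl_cons, hstep, ih]
      simp only [List.all_cons, hh, Bool.true_and, List.length_cons]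
      split
      · congr 1; push_cast; ring
      · rfl
    · have hstep : pvStep matrix n (some s) h = none := by
        simp only [pvChk, Bool.and_eq_true, beq_iff_eq] at hh
        simp [pvStep]
        intro ha hb
        exact hh ⟨by simp [ha], by simp [hb]⟩
      rw [List.foldl_cons, hstep, foldl_pvStep_none]
      simp [List.all_cons, hh]

theorem ports_eq (matrix : List (List Int)) (diagonal_sum : Int) :
    diagonal_validation matrix diagonal_sum = diagonal_validation_alt matrix diagonal_sum := by
  have hn0 : (0 : Int) ≤ (matrix.length : Int) := Int.natCast_nonneg _
  have hLlen : ((PySem.List.pyRange 0 ((matrix.length : Int)) 1).length : Int)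
      = (matrix.length : Int) := by
    rw [PySem.List.length_pyRange_one]; omega
  simp only [diagonal_validation, diagonal_validation_alt]
  rw [foldl_pvStep_char]
  by_cases hall : (PySem.List.pyRange 0 ((matrix.length : Int)) 1).all
      (pvChk matrix (matrix.length : Int)) = true
  · rw [if_pos hall, hall]
    simp only [Bool.true_and]
    by_cases hodd : (matrix.length : Int) % 2 > 0
    · have hmid : PySem.Int.floordiv (matrix.length : Int) 2 = (matrix.length : Int) / 2 :=
        PySem.Int.floordiv_eq_ediv_of_pos (by omega)
      have hmem : (matrix.length : Int) / 2 ∈ PySem.List.pyRange 0 ((matrix.length : Int)) 1 := by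
        rw [PySem.List.mem_pyRange_one]; omega
      have hc := List.all_eq_true.mp hall _ hmem
      have hcen : ((PySem.List.pyGet? matrix ((matrix.length : Int) / 2)).bind
          (fun r => PySem.List.pyGet? r ((matrix.length : Int) / 2))) = some 1 := by
        simp only [pvChk, Bool.and_eq_true, beq_iff_eq] at hc
        exact hc.1
      rw [if_pos hodd, hmid, hcen]
      simp only [Option.getD_some]
      have h1 : (matrix.length : Int) % 2 = 1 := by omega
      rw [h1, hLlen]
      simp only [pvBeq_decide]
      norm_num
    · rw [if_neg hodd]
      have h0 : (matrix.length : Int) % 2 = 0 := by omega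
      rw [h0, hLlen]
      simp only [pvBeq_decide]
      norm_num
  · rw [if_neg hall]
    simp [hall]

-- ===== VERDICT (by name: the statement is the Claim_ definition above) =====
theorem diagonal_validation_spec : Claim_equal_diagonal_validation := by
  intro m d _ _
  unfold Spec_diagonal_validation
  exact ports_eq m d
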